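-- pv_equiv track=rewrite | github.com/AT190510-Cuong/ThuatToanATTT | cuoi_ky/phan_1/cau_25.py | find_prime_sum
-- ===== SOURCE A (Python) =====
-- import math
-- import itertools
--
-- def check_snt(n):
--     if n < 2:
--         return False
--     for i in range(2, int(math.sqrt(n)) + 1):
--         if n % i == 0:
--             return False
--     return True
--
-- def sieve_of_eratosthenes(max_n):
--     primes = []
--     for num in range(2, max_n + 1):
--         if check_snt(num):
--             primes.append(num)
--     return primes
--
-- def find_prime_sum(N):
--     primes = sieve_of_eratosthenes(10001)
--
--     for M in range(3, 101):
--         if N < 2 * M: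
--             continue  # Tổng của M số nguyên tố khác nhau nhỏ nhất luôn lớn hơn hoặc bằng 2M
--
--         for combination in itertools.combinations(primes, M):
--             if sum(combination) == N:
--                 return (M, combination)
--     return None
-- ===== SOURCE B (Python) =====
-- import math
--
-- def _primes():
--     # trial-division primality over the same fixed range, as a comprehension
--     return [p for p in range(2, 10002)
--             if all(p % d != 0 for d in range(2, math.isqrt(p) + 1))]
--
-- def _search(primes, i, m, t):
--     # lexicographically first choice of m distinct values from the sorted tail
--     # primes[i:] summing to t; branch-and-bound pruning on the least/greatest
--     # achievable sum and on parity (all candidates beyond 2 are odd)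
--     n = len(primes)
--     if m == 0:
--         return [] if t == 0 else None
--     while n - i >= m:
--         if sum(primes[i:i + m]) > t:      # m smallest remaining already too big
--             return None
--         if sum(primes[n - m:]) < t:       # m largest remaining too small
--             return None
--         if primes[i] % 2 == 1 and (t - m) % 2 == 1:
--             return None                   # m odd numbers cannot have sum of this parity
--         sub = _search(primes, i + 1, m - 1, t - primes[i])
--         if sub is not None:
--             return [primes[i]] + sub
--         i += 1
--     return None
--
-- def find_prime_sum(N):
--     primes = _primes()
--     for M in range(3, 101):
--         c = _search(primes, 0, M, N)
--         if c is not None: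
--             return (M, tuple(c))
--     return None
-- ===== Notes on version B (the rewrite author's own statement) =====
-- stated objective: faster
-- what changed: A scans every itertools.combinations(primes, M) tuple for each M; B runs a lexicographic branch-and-bound search that prunes a whole subtree whenever the m smallest (or m largest) remaining primes already over/undershoot the residual target or the residual parity is unreachable, returning the same lexicographically-first combination.
import Mathlib
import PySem

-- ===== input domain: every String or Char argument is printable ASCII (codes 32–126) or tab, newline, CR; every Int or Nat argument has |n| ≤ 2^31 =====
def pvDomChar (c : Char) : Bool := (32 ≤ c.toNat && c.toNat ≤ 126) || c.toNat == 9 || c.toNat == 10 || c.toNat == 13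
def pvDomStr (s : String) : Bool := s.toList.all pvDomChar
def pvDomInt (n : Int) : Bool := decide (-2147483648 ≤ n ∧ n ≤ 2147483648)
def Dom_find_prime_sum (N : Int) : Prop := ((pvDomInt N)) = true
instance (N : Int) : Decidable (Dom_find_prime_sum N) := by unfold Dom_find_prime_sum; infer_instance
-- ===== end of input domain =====

-- B replaces A's exhaustive scan of itertools.combinations (exponential) by a
-- branch-and-bound lexicographic search with least/greatest-sum and parity pruning.

-- ===== PORT A =====

-- int(math.sqrt(n)): exact for the arguments the sieve passes (0 ≤ n ≤ 10001)
def aSqrt (n : Int) : Int := (n.toNat.sqrt : Int)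

-- the trial-division loop with early 'return False' = List.all over the range
def check_snt (n : Int) : Bool :=
  if n < 2 then false
  else (PySem.List.pyRange 2 (aSqrt n + 1) 1).all (fun i => !(PySem.Int.mod n i == 0))

-- append-to-primes loop over range(2, max_n+1) = filter
def sieve_of_eratosthenes (max_n : Int) : List Int :=
  (PySem.List.pyRange 2 (max_n + 1) 1).filter check_snt

-- 'for combination in itertools.combinations(primes, M): if sum(combination) == N: return combination'
-- = the lexicographic generator fused with the sum test (the loop's early return);
--   the residual target t - x tracks 'sum(combination) == N'
def firstCombo : List Int → Nat → Int → Option (List Int)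
  | _, 0, t => if t == 0 then some [] else none
  | [], _ + 1, _ => none
  | x :: xs, m + 1, t =>
    match firstCombo xs m (t - x) with
    | some c => some (x :: c)
    | none => firstCombo xs (m + 1) t
termination_by l _ _ => l.length

-- 'for M in range(3, 101)' with the 'continue' guard and the early return
def aLoop (primes : List Int) (N : Int) : List Int → Option (Int × List Int)
  | [] => none
  | M :: Ms =>
    if N < 2 * M then aLoop primes N Ms
    else
      match firstCombo primes M.toNat N with
      | some c => some (M, c)
      | none => aLoop primes N Ms

def find_prime_sum (N : Int) : Option (Int × List Int) :=
  aLoop (sieve_of_eratosthenes 10001) N (PySem.List.pyRange 3 101 1)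

-- ===== PORT B =====

-- math.isqrt(p): arguments are ≥ 2 here
def bSqrt (p : Int) : Int := (p.toNat.sqrt : Int)

-- all(p % d != 0 for d in range(2, isqrt(p)+1))
def bIsPrime (p : Int) : Bool :=
  (PySem.List.pyRange 2 (bSqrt p + 1) 1).all (fun d => !(PySem.Int.mod p d == 0))

-- [p for p in range(2, 10002) if ...]
def bPrimes : List Int :=
  (PySem.List.pyRange 2 10002 1).filter bIsPrime

-- _search(primes, i, m, t): the while loop is the tail-recursive call at i+1;
-- primes[i] is pyGetD, the slices primes[i:i+m] and primes[n-m:] are PySem.List.slice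
-- (n - m computed as Nat subtraction: the loop guard gives n ≥ i + m)
def bSearch (primes : List Int) (i m : Nat) (t : Int) : Option (List Int) :=
  match m with
  | 0 => if t == 0 then some [] else none
  | m + 1 =>
    if h : primes.length < i + (m + 1) then none   -- 'while n - i >= m' fails
    else if (PySem.List.slice primes (some (i : Int)) (some ((i : Int) + ((m+1 : Nat) : Int)))).sum > t then none
    else if (PySem.List.slice primes (some ((primes.length - (m+1) : Nat) : Int)) none).sum < t then none
    else if (PySem.Int.mod (PySem.List.pyGetD primes (i : Int) 0) 2 == 1)
             && (PySem.Int.mod (t - ((m+1 : Nat) : Int)) 2 == 1) then none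
    else
      match bSearch primes (i + 1) m (t - PySem.List.pyGetD primes (i : Int) 0) with
      | some sub => some (PySem.List.pyGetD primes (i : Int) 0 :: sub)
      | none => bSearch primes (i + 1) (m + 1) t
termination_by primes.length - i
decreasing_by all_goals omega

-- 'for M in range(3, 101)' with the early return
def bLoop (primes : List Int) (N : Int) : List Int → Option (Int × List Int)
  | [] => none
  | M :: Ms =>
    match bSearch primes 0 M.toNat N with
    | some c => some (M, c)
    | none => bLoop primes N Ms

def find_prime_sum_alt (N : Int) : Option (Int × List Int) :=
  bLoop bPrimes N (PySem.List.pyRange 3 101 1)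

-- ===== PRECONDITION & SPEC =====
def Spec_find_prime_sum (N : Int) (out : Option (Int × List Int)) : Prop := out = find_prime_sum_alt N
instance (N : Int) (out : Option (Int × List Int)) : Decidable (Spec_find_prime_sum N out) := by unfold Spec_find_prime_sum; infer_instance

-- ===== CLAIM (what is proved, stated in full; the proofs are below) =====
def Claim_equal_find_prime_sum : Prop := ∀ (N : Int), Dom_find_prime_sum N → Spec_find_prime_sum N (find_prime_sum N)

-- ===== LEMMAS AND PROOFS =====

theorem firstCombo_sound (l : List Int) (m : Nat) (t : Int) (c : List Int)
    (h : firstCombo l m t = some c) : c.Sublist l ∧ c.length = m ∧ c.sum = t := by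
  induction l generalizing m t c with
  | nil =>
    cases m with
    | zero =>
      rw [firstCombo] at h
      split at h
      · next ht => cases h; exact ⟨List.Sublist.refl _, rfl, by simp [beq_iff_eq.mp ht]⟩
      · cases h
    | succ m => rw [firstCombo] at h; cases h
  | cons x xs ih =>
    cases m with
    | zero =>
      rw [firstCombo] at h
      split at h
      · next ht => cases h; exact ⟨List.nil_sublist _, rfl, by simp [beq_iff_eq.mp ht]⟩
      · cases h
    | succ m =>
      rw [firstCombo] at h
      cases hrec : firstCombo xs m (t - x) with
      | some c' =>
        rw [hrec] at h; cases h
        obtain ⟨h1, h2, h3⟩ := ih m (t - x) c' hrec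
        exact ⟨h1.cons₂ x, by simp [h2], by simp only [List.sum_cons, h3]; ring⟩
      | none =>
        rw [hrec] at h
        obtain ⟨h1, h2, h3⟩ := ih (m+1) t c h
        exact ⟨h1.cons x, h2, h3⟩

theorem firstCombo_none_of_length (l : List Int) (m : Nat) (t : Int)
    (h : l.length < m) : firstCombo l m t = none := by
  induction l generalizing m t with
  | nil => cases m with
    | zero => omega
    | succ m => rw [firstCombo]
  | cons x xs ih =>
    cases m with
    | zero => simp at h
    | succ m =>
      rw [firstCombo]
      simp at h
      rw [ih m (t - x) (by omega), ih (m+1) t (by omega)]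

theorem sum_take_le_sum_of_sublist (l c : List Int)
    (h : c.Sublist l) : l.Pairwise (· ≤ ·) → (l.take c.length).sum ≤ c.sum := by
  induction h with
  | slnil => simp
  | @cons c l a h ih =>
    intro hp
    have hle := ih (hp.of_cons)
    cases c with
    | nil => simp
    | cons y c' =>
      have hk : c'.length + 1 ≤ l.length := by simpa using h.length_le
      have hx : (a :: l).take (y :: c').length = a :: l.take c'.length := by simp
      rw [hx]
      have hts : (l.take (c'.length + 1)).sum = (l.take c'.length).sum + l[c'.length] := by
        rw [List.take_add_one, List.getElem?_eq_getElem (by omega)]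
        simp only [Option.toList_some, List.sum_append, List.sum_cons, List.sum_nil]
        omega
      have hal : a ≤ l[c'.length] := List.rel_of_pairwise_cons hp (l.getElem_mem _)
      simp only [List.length_cons, List.sum_cons] at hle ⊢
      omega
  | @cons₂ c l a h ih =>
    intro hp
    have := ih hp.of_cons
    simp only [List.length_cons, List.take_succ_cons, List.sum_cons]
    omega

theorem sum_le_sum_drop_of_sublist (l c : List Int) (hs : l.Pairwise (· ≤ ·))
    (h : c.Sublist l) : c.sum ≤ (l.drop (l.length - c.length)).sum := by
  have h' : (c.reverse.map (fun z => -z)).Sublist (l.reverse.map (fun z => -z)) :=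
    (h.reverse).map _
  have hs' : (l.reverse.map (fun z => -z)).Pairwise (· ≤ ·) := by
    rw [List.pairwise_map, List.pairwise_reverse]
    exact hs.imp (fun hab => by omega)
  have hb := sum_take_le_sum_of_sublist _ _ h' hs'
  simp only [List.length_map, List.length_reverse, ← List.map_take] at hb
  rw [List.take_reverse] at hb
  rw [← List.sum_neg, ← List.sum_neg, List.sum_reverse, List.sum_reverse] at hb
  omega
theorem sum_emod_two_of_odd (c : List Int) (h : ∀ x ∈ c, x % 2 = 1) :
    c.sum % 2 = (c.length : Int) % 2 := by
  induction c with
  | nil => simp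
  | cons a c ih =>
    have ha := h a (by simp)
    have hc := ih (fun x hx => h x (by simp [hx]))
    simp only [List.sum_cons, List.length_cons]
    push_cast
    omega

theorem two_mul_length_le_sum (c : List Int) (h : ∀ x ∈ c, 2 ≤ x) :
    2 * (c.length : Int) ≤ c.sum := by
  induction c with
  | nil => simp
  | cons a c ih =>
    have ha := h a (by simp)
    have hc := ih (fun x hx => h x (by simp [hx]))
    simp only [List.sum_cons, List.length_cons]
    push_cast
    omega

theorem firstCombo_none_of_take (l : List Int) (m : Nat) (t : Int)
    (hs : l.Pairwise (· ≤ ·)) (h : t < (l.take m).sum) : firstCombo l m t = none := by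
  cases hfc : firstCombo l m t with
  | none => rfl
  | some c =>
    obtain ⟨hsub, hlen, hsum⟩ := firstCombo_sound _ _ _ _ hfc
    have hb := sum_take_le_sum_of_sublist _ _ hsub hs
    rw [hlen, hsum] at hb
    omega

theorem firstCombo_none_of_drop (l : List Int) (m : Nat) (t : Int)
    (hs : l.Pairwise (· ≤ ·)) (h : (l.drop (l.length - m)).sum < t) : firstCombo l m t = none := by
  cases hfc : firstCombo l m t with
  | none => rfl
  | some c =>
    obtain ⟨hsub, hlen, hsum⟩ := firstCombo_sound _ _ _ _ hfc
    have hb := sum_le_sum_drop_of_sublist _ _ hs hsub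
    rw [hlen, hsum] at hb
    omega

theorem bPrimes_sorted : bPrimes.Pairwise (· ≤ ·) := by
  have h := PySem.List.pairwise_lt_pyRange_one (a := 2) (b := 10002)
  exact (h.sublist List.filter_sublist).imp le_of_lt

theorem bPrimes_ge_two : ∀ x ∈ bPrimes, 2 ≤ x := by
  intro x hx
  have := (PySem.List.mem_pyRange_one.mp (List.mem_filter.mp hx).1).1
  omega

theorem bPrimes_two_or_odd : ∀ x ∈ bPrimes, x = 2 ∨ x % 2 = 1 := by
  intro x hx
  obtain ⟨hmem, hpass⟩ := List.mem_filter.mp hx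
  obtain ⟨hx2, _⟩ := PySem.List.mem_pyRange_one.mp hmem
  by_cases h2 : x = 2
  · exact Or.inl h2
  by_cases h3 : x = 3
  · right; omega
  right
  by_contra hodd
  have hev : x % 2 = 0 := by omega
  have hx4 : 4 ≤ x := by omega
  have hsq : 2 < bSqrt x + 1 := by
    unfold bSqrt
    have : 2 ≤ x.toNat.sqrt := by
      rw [Nat.le_sqrt]
      omega
    omega
  have h2mem : (2 : Int) ∈ PySem.List.pyRange 2 (bSqrt x + 1) 1 :=
    PySem.List.mem_pyRange_one.mpr ⟨le_refl _, hsq⟩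
  have := List.all_eq_true.mp hpass 2 h2mem
  simp only [Bool.not_eq_eq_eq_not, Bool.not_true, beq_eq_false_iff_ne] at this
  rw [PySem.Int.mod_eq_emod_of_pos (by omega)] at this
  omega

theorem primes_eq : sieve_of_eratosthenes 10001 = bPrimes := by
  unfold sieve_of_eratosthenes bPrimes
  norm_num
  apply List.filter_congr
  intro x hx
  have h2 := (PySem.List.mem_pyRange_one.mp hx).1
  unfold check_snt bIsPrime aSqrt bSqrt
  rw [if_neg (by omega)]
theorem bSearch_eq (primes : List Int) (hs : primes.Pairwise (· ≤ ·))
    (h2 : ∀ x ∈ primes, 2 ≤ x) (hodd : ∀ x ∈ primes, x = 2 ∨ x % 2 = 1)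
    (i m : Nat) (t : Int) :
    bSearch primes i m t = firstCombo (primes.drop i) m t := by
  fun_induction bSearch primes i m t with
  | case1 i t h => simp [firstCombo, h]
  | case2 i t h => rw [firstCombo]; simp [h]
  | case3 i t m h =>
    exact (firstCombo_none_of_length _ _ _ (by simp; omega)).symm
  | case4 i t m hlen h =>
    rw [PySem.List.slice_natCast_add] at h
    exact (firstCombo_none_of_take _ _ _ (hs.sublist (List.drop_sublist _ _)) (by omega)).symm
  | case5 i t m hlen h1 h =>
    rw [PySem.List.slice_from_natCast] at h
    refine (firstCombo_none_of_drop _ _ _ (hs.sublist (List.drop_sublist _ _)) ?_).symm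
    have he : (primes.drop i).drop ((primes.drop i).length - (m+1)) = primes.drop (primes.length - (m+1)) := by
      rw [List.drop_drop]
      congr 1
      simp
      omega
    rw [he]
    exact h
  | case6 i t m hlen h1 h2' h =>
    have hi : i < primes.length := by omega
    rw [PySem.List.pyGetD_natCast, List.getD_eq_getElem _ _ hi] at h
    obtain ⟨hx, hp⟩ := Bool.and_eq_true_iff.mp h
    rw [beq_iff_eq, PySem.Int.mod_eq_emod_of_pos (by omega)] at hx hp
    cases hfc : firstCombo (primes.drop i) (m+1) t with
    | none => rfl
    | some c =>
      exfalso
      obtain ⟨hsub, hlenc, hsum⟩ := firstCombo_sound _ _ _ _ hfc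
      have hdrop := List.drop_eq_getElem_cons hi
      have hxge : 2 ≤ primes[i] := h2 _ (primes.getElem_mem _)
      have hco : ∀ y ∈ c, y % 2 = 1 := by
        intro y hy
        have hyd : y ∈ primes.drop i := hsub.subset hy
        have hxy : primes[i] ≤ y := by
          rw [hdrop] at hyd
          rcases List.mem_cons.mp hyd with h | h
          · omega
          · exact List.rel_of_pairwise_cons (by rw [← hdrop]; exact hs.sublist (List.drop_sublist _ _)) h
        have := hodd y (List.mem_of_mem_drop hyd)
        omega
      have hpar := sum_emod_two_of_odd c hco
      rw [hsum, hlenc] at hpar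
      push_cast at hpar hp
      omega
  | case7 i t m hlen h1 h2' h3 c hcall ih =>
    have hi : i < primes.length := by omega
    rw [PySem.List.pyGetD_natCast, List.getD_eq_getElem _ _ hi] at hcall ih ⊢
    rw [List.drop_eq_getElem_cons hi, firstCombo, ← ih, hcall]
  | case8 i t m hlen h1 h2' h3 hcall ih2 ih1 =>
    have hi : i < primes.length := by omega
    rw [PySem.List.pyGetD_natCast, List.getD_eq_getElem _ _ hi] at hcall ih2
    rw [List.drop_eq_getElem_cons hi, firstCombo, ← ih2, hcall, ih1]
theorem loops_eq (primes : List Int) (hs : primes.Pairwise (· ≤ ·))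
    (h2 : ∀ x ∈ primes, 2 ≤ x) (hodd : ∀ x ∈ primes, x = 2 ∨ x % 2 = 1)
    (N : Int) (Ms : List Int) (hMs : ∀ M ∈ Ms, 0 ≤ M) :
    aLoop primes N Ms = bLoop primes N Ms := by
  induction Ms with
  | nil => rfl
  | cons M Ms ih =>
    have hM := hMs M (by simp)
    have hb : bSearch primes 0 M.toNat N = firstCombo primes M.toNat N := by
      rw [bSearch_eq primes hs h2 hodd, List.drop_zero]
    rw [aLoop, bLoop, hb]
    by_cases hlt : N < 2 * M
    · rw [if_pos hlt]
      have hnone : firstCombo primes M.toNat N = none := by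
        cases hfc : firstCombo primes M.toNat N with
        | none => rfl
        | some c =>
          exfalso
          obtain ⟨hsub, hlenc, hsum⟩ := firstCombo_sound _ _ _ _ hfc
          have := two_mul_length_le_sum c (fun x hx => h2 x (hsub.subset hx))
          rw [hsum, hlenc] at this
          omega
      rw [hnone, ih (fun M hM => hMs M (by simp [hM]))]
    · rw [if_neg hlt]
      cases hfc : firstCombo primes M.toNat N with
      | none => exact ih (fun M hM => hMs M (by simp [hM]))
      | some c => rfl

-- ===== VERDICT (by name: the statement is the Claim_ definition above) =====
theorem find_prime_sum_spec : Claim_equal_find_prime_sum := by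
  intro N _
  show find_prime_sum N = find_prime_sum_alt N
  unfold find_prime_sum find_prime_sum_alt
  rw [primes_eq]
  exact loops_eq _ bPrimes_sorted bPrimes_ge_two bPrimes_two_or_odd N _
    (fun M hM => by
      have := (PySem.List.mem_pyRange_one.mp hM).1
      omega)
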